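-- pv_equiv track=rewrite | github.com/Boostcamp-Recsys9/codingtest-practice | week2/윤성/5.py | solution
-- ===== SOURCE A (Python) =====
-- from collections import deque
--
-- def solution(rc, operations):
--     r_len,c_len = len(rc),len(rc[0])
--     answer = []
--     row = deque(deque(row[1:-1]) for row in rc)
--     out_col = [deque(rc[i][0] for i in range(r_len)),deque(rc[k][c_len-1] for k in range(r_len))]
--     for commend in operations:
--         if commend == "ShiftRow":
--             row.appendleft(row.pop())
--             out_col[0].appendleft(out_col[0].pop())
--             out_col[1].appendleft(out_col[1].pop())
--         else:
--             row[r_len-1].append(out_col[1].pop())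
--             out_col[0].append(row[r_len-1].popleft())
--             row[0].appendleft(out_col[0].popleft())
--             out_col[1].appendleft(row[0].pop())
--     for k in range(r_len):
--         temp = []
--         temp.append(out_col[0][k])
--         temp.extend(row[k])
--         temp.append(out_col[1][k])
--         answer.append(temp)
--     return answer
-- ===== SOURCE B (Python) =====
-- def _rotate(g):
--     # clockwise rotation of the outer border ring by one
--     if len(g) == 1:
--         row = g[0]
--         return [row[-1:] + row[:-1]]
--     top, bot, mid = g[0], g[-1], g[1:-1]
--     below_left = [row[0] for row in mid] + [bot[0]]      # left column of rows 1..r-1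
--     above_right = [top[-1]] + [row[-1] for row in mid]   # right column of rows 0..r-2
--     new_top = [below_left[0]] + top[:-1]
--     new_bot = bot[1:] + [above_right[-1]]
--     new_mid = [[l] + row[1:-1] + [r]
--                for row, (l, r) in zip(mid, zip(below_left[1:], above_right[:-1]))]
--     return [new_top] + new_mid + [new_bot]
--
--
-- def solution(rc, operations):
--     grid = [list(row) for row in rc]
--     for op in operations:
--         if op == "ShiftRow":
--             grid = grid[-1:] + grid[:-1]
--         else:
--             grid = _rotate(grid)
--     return grid
-- ===== Notes on version B (the rewrite author's own statement) =====
-- stated objective: simpler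
-- what changed: B keeps one plain 2-D grid and per operation either rotates the row list or rewrites the outer border ring, instead of A's three parallel deque structures (middle-rows deque plus two column deques) threaded through every command and reassembled at the end.
-- intended difference: On single-column matrices A emits every row with its lone entry duplicated (both of its column deques hold the same column), and on single-row matrices of width >= 3 a non-'ShiftRow' operation makes A merely swap the first two entries (its top and bottom rows are the same aliased deque); B preserves the width and rotates the border ring (for one row, the whole row) clockwise by one, which is the intended behaviour. — e.g. on solution([[7]], ["Rotate"]): A returns [[7, 7]], B returns [[7]]
-- outside the precondition, e.g. on solution([[1, 2], [3, 4, 5]], []): A returns [[1, 2], [3, 4, 4]], B returns [[1, 2], [3, 4, 5]]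
import Mathlib
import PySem

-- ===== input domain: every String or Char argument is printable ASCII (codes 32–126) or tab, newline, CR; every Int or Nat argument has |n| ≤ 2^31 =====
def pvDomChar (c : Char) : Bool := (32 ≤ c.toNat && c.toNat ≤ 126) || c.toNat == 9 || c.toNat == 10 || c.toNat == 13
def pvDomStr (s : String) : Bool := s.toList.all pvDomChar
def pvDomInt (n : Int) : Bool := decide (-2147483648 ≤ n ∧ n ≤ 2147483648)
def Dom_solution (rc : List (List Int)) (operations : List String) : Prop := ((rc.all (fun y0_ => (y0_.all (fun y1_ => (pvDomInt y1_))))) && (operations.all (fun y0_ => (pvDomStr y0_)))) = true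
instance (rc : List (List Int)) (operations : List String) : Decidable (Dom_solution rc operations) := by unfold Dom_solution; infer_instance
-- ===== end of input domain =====

-- B keeps one plain 2-D grid, rotating the row list / rewriting the border ring per
-- operation, instead of A's middle-rows deque plus two column deques (objective: simpler).

-- ===== PORT A =====
-- deque.appendleft(deque.pop()): rotate one step, last element to the front
def pvRotOne {α : Type} (l : List α) : List α :=
  match l.getLast? with
  | none => l
  | some x => x :: l.dropLast

-- the body of A's `for commend in operations` loop (r = r_len, fixed before the loop)
def pvStepA (r : Nat) (st : List (List Int) × List Int × List Int) (cmd : String) :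
    List (List Int) × List Int × List Int :=
  match st with
  | (row, oc0, oc1) =>
    if cmd = "ShiftRow" then
      (pvRotOne row, pvRotOne oc0, pvRotOne oc1)
    else
      let row₁ := row.modify (r - 1) (fun dq => dq ++ [oc1.getLastD 0])
      let oc1₁ := oc1.dropLast
      let oc0₁ := oc0 ++ [(row₁.getD (r - 1) []).headD 0]
      let row₂ := row₁.modify (r - 1) List.tail
      let row₃ := row₂.modify 0 (fun dq => oc0₁.headD 0 :: dq)
      let oc0₂ := oc0₁.tail
      let oc1₂ := (row₃.getD 0 []).getLastD 0 :: oc1₁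
      let row₄ := row₃.modify 0 List.dropLast
      (row₄, oc0₂, oc1₂)

def solution (rc : List (List Int)) (operations : List String) : List (List Int) :=
  let r : Nat := rc.length
  let c : Nat := (PySem.List.pyGetD rc 0 []).length
  let row : List (List Int) := rc.map (fun rw => PySem.List.slice rw (some 1) (some (-1)))
  let oc0 : List Int := (PySem.List.pyRange 0 r 1).map
    (fun i => PySem.List.pyGetD (PySem.List.pyGetD rc i []) 0 0)
  let oc1 : List Int := (PySem.List.pyRange 0 r 1).map
    (fun k => PySem.List.pyGetD (PySem.List.pyGetD rc k []) ((c : Int) - 1) 0)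
  let st := operations.foldl (pvStepA r) (row, oc0, oc1)
  (PySem.List.pyRange 0 r 1).foldl
    (fun answer k =>
      answer ++ [PySem.List.pyGetD st.2.1 k 0 ::
        PySem.List.pyGetD st.1 k [] ++ [PySem.List.pyGetD st.2.2 k 0]]) []

-- ===== PORT B =====
-- _rotate: clockwise rotation of the outer border ring by one
def pvRotateB (g : List (List Int)) : List (List Int) :=
  if g.length = 1 then
    let row := PySem.List.pyGetD g 0 []
    [PySem.List.slice row (some (-1)) none ++ PySem.List.slice row none (some (-1))]
  else
    let top := PySem.List.pyGetD g 0 []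
    let bot := PySem.List.pyGetD g (-1) []
    let mid := PySem.List.slice g (some 1) (some (-1))
    let below_left := mid.map (fun rw => PySem.List.pyGetD rw 0 0) ++ [PySem.List.pyGetD bot 0 0]
    let above_right := PySem.List.pyGetD top (-1) 0 :: mid.map (fun rw => PySem.List.pyGetD rw (-1) 0)
    let new_top := PySem.List.pyGetD below_left 0 0 :: PySem.List.slice top none (some (-1))
    let new_bot := PySem.List.slice bot (some 1) none ++ [PySem.List.pyGetD above_right (-1) 0]
    let new_mid := (mid.zip ((PySem.List.slice below_left (some 1) none).zip
        (PySem.List.slice above_right none (some (-1))))).map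
      (fun p => p.2.1 :: PySem.List.slice p.1 (some 1) (some (-1)) ++ [p.2.2])
    new_top :: new_mid ++ [new_bot]

def pvStepB (g : List (List Int)) (op : String) : List (List Int) :=
  if op = "ShiftRow" then
    PySem.List.slice g (some (-1)) none ++ PySem.List.slice g none (some (-1))
  else pvRotateB g

def solution_alt (rc : List (List Int)) (operations : List String) : List (List Int) :=
  operations.foldl pvStepB (rc.map (fun rw => rw))

-- ===== PRECONDITION & SPEC =====
-- Pre_ admits the natural matrix domain: nonempty rectangular matrices with nonempty rows.
-- A raises (IndexError) on the empty list and on rows shorter than the first row; on ragged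
-- inputs whose later rows are longer than the first, A returns a value that truncates and
-- duplicates entries of those rows — outside the natural matrix domain, excluded (see cites).
def Pre_solution (rc : List (List Int)) (operations : List String) : Prop :=
  rc ≠ [] ∧ (rc.headD []) ≠ [] ∧ ∀ row ∈ rc, row.length = (rc.headD []).length
instance (rc : List (List Int)) (operations : List String) : Decidable (Pre_solution rc operations) := by
  unfold Pre_solution; infer_instance

def pvWitness_solution : List (List Int) × List String :=
  ([[1, 2, 3], [4, 5, 6], [7, 8, 9]], ["Rotate", "ShiftRow", "Rotate"])

-- On single-column matrices A emits every row with its lone entry duplicated (both of its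
-- column deques hold the same column), and on single-row matrices of width ≥ 3 a
-- non-"ShiftRow" operation makes A merely swap the first two entries (its top and bottom
-- rows are the same aliased deque); B preserves the width and rotates the border ring
-- (for one row, the whole row) clockwise by one, which is the intended behaviour.
def D_solution (rc : List (List Int)) (operations : List String) : Prop :=
  (rc.headD []).length = 1 ∨
    (rc.length = 1 ∧ 3 ≤ (rc.headD []).length ∧ ∃ op ∈ operations, op ≠ "ShiftRow")
instance (rc : List (List Int)) (operations : List String) : Decidable (D_solution rc operations) := by
  unfold D_solution; infer_instance

def Spec_solution (rc : List (List Int)) (operations : List String) (out : List (List Int)) : Prop :=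
  ¬ D_solution rc operations → out = solution_alt rc operations
instance (rc : List (List Int)) (operations : List String) (out : List (List Int)) :
    Decidable (Spec_solution rc operations out) := by
  unfold Spec_solution; infer_instance

def pvDiffWitness_solution : List (List Int) × List String := ([[7]], ["Rotate"])
def pvDiffWitnessOut_solution : (List (List Int)) × (List (List Int)) := ([[7, 7]], [[7]])

-- ===== CLAIM (what is proved, stated in full; the proofs are below) =====
def Claim_unchanged_solution : Prop := ∀ (rc : List (List Int)) (operations : List String),
  Dom_solution rc operations → Pre_solution rc operations →
    Spec_solution rc operations (solution rc operations)
def Claim_changed_solution : Prop :=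
  Dom_solution (pvDiffWitness_solution.1) (pvDiffWitness_solution.2) ∧
  Pre_solution (pvDiffWitness_solution.1) (pvDiffWitness_solution.2) ∧
  D_solution (pvDiffWitness_solution.1) (pvDiffWitness_solution.2) ∧
  solution (pvDiffWitness_solution.1) (pvDiffWitness_solution.2) = pvDiffWitnessOut_solution.1 ∧
  solution_alt (pvDiffWitness_solution.1) (pvDiffWitness_solution.2) = pvDiffWitnessOut_solution.2 ∧
  pvDiffWitnessOut_solution.1 ≠ pvDiffWitnessOut_solution.2

-- ===== LEMMAS AND PROOFS =====

def pvMids (g : List (List Int)) : List (List Int) := g.map (fun rw => rw.tail.dropLast)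
def pvHeads (g : List (List Int)) : List Int := g.map (fun rw => rw.headD 0)
def pvLasts (g : List (List Int)) : List Int := g.map (fun rw => rw.getLastD 0)


theorem pvRotOne_map {α β : Type} (f : α → β) (l : List α) :
    pvRotOne (l.map f) = (pvRotOne l).map f := by
  rcases l.eq_nil_or_concat with rfl | ⟨l', a, rfl⟩
  · rfl
  · simp [pvRotOne]

theorem pvStepB_shift (g : List (List Int)) : pvStepB g "ShiftRow" = pvRotOne g := by
  rcases g.eq_nil_or_concat with rfl | ⟨l, a, rfl⟩
  · rfl
  · simp [pvStepB, pvRotOne, PySem.List.slice_some_none, PySem.List.slice_to_neg_one]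

theorem pvStepA_shift (r : Nat) (g : List (List Int)) :
    pvStepA r (pvMids g, pvHeads g, pvLasts g) "ShiftRow" =
      (pvMids (pvRotOne g), pvHeads (pvRotOne g), pvLasts (pvRotOne g)) := by
  simp [pvStepA, pvMids, pvHeads, pvLasts, pvRotOne_map]

theorem slice11 {α : Type} (xs : List α) : PySem.List.slice xs (some 1) (some (-1)) = xs.tail.dropLast := by
  cases xs with
  | nil => simp [PySem.List.slice, PySem.List.clampIdx]
  | cons a t =>
    simp [PySem.List.slice, PySem.List.clampIdx, List.dropLast_eq_take]
    split_ifs with h <;> omega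

theorem pyGetD0 {α : Type} (rw : List α) (d : α) : PySem.List.pyGetD rw 0 d = rw.headD d := by
  cases rw <;> simp [PySem.List.pyGetD_zero]

theorem pyGetDneg1 {α : Type} (rw : List α) (d : α) : PySem.List.pyGetD rw (-1) d = rw.getLastD d := by
  rcases rw.eq_nil_or_concat with rfl | ⟨l, a, rfl⟩
  · simp [PySem.List.pyGetD, PySem.List.pyGet?]
  · simp [PySem.List.pyGetD_neg_one_append_singleton]

theorem modify_append_length {α : Type} (l : List α) (y : α) (f : α → α) :
    (l ++ [y]).modify l.length f = l ++ [f y] := by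
  induction l with
  | nil => simp
  | cons a t ih => simp [ih]

theorem getD_append_length {α : Type} (l : List α) (y : α) (d : α) :
    (l ++ [y]).getD l.length d = y := by simp

theorem headD_cons_tail {α : Type} (l : List α) (d : α) (h : l ≠ []) : l.headD d :: l.tail = l := by
  cases l <;> simp_all

theorem tail_append_left {α : Type} (l l' : List α) (h : l ≠ []) : (l ++ l').tail = l.tail ++ l' := by
  cases l <;> simp_all

theorem headD_append_left {α : Type} (l l' : List α) (d : α) (h : l ≠ []) :
    (l ++ l').headD d = l.headD d := by cases l <;> simp_all

theorem getLastD_cons_ne {α : Type} (a : α) (l : List α) (d : α) (h : l ≠ []) :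
    (a :: l).getLastD d = l.getLastD d := by cases l <;> simp_all

theorem dropLast_append_getLastD {α : Type} (l : List α) (d : α) (h : l ≠ []) :
    l.dropLast ++ [l.getLastD d] = l := by
  rcases l.eq_nil_or_concat with rfl | ⟨l', a, rfl⟩ <;> simp_all

theorem dropLast_cons_ne {α : Type} (a : α) (l : List α) (h : l ≠ []) :
    (a :: l).dropLast = a :: l.dropLast := by cases l <;> simp_all

theorem zip3_mids (m : List (List Int)) (bl ar : List Int)
    (h1 : bl.length = m.length) (h2 : ar.length = m.length) :
    ((m.zip (bl.zip ar)).map (fun p => p.2.1 :: p.1.tail.dropLast ++ [p.2.2])).map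
      (fun rw => rw.tail.dropLast) = m.map (fun rw => rw.tail.dropLast) := by
  induction m generalizing bl ar with
  | nil => simp
  | cons x xs ih =>
    cases bl with | nil => simp at h1 | cons b bs =>
    cases ar with | nil => simp at h2 | cons a as =>
    simp_all

theorem zip3_heads (m : List (List Int)) (bl ar : List Int)
    (h1 : bl.length = m.length) (h2 : ar.length = m.length) :
    ((m.zip (bl.zip ar)).map (fun p => p.2.1 :: p.1.tail.dropLast ++ [p.2.2])).map
      (fun rw => rw.headD 0) = bl := by
  induction m generalizing bl ar with
  | nil => cases bl <;> simp_all
  | cons x xs ih =>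
    cases bl with | nil => simp at h1 | cons b bs =>
    cases ar with | nil => simp at h2 | cons a as =>
    simp_all

theorem zip3_lasts (m : List (List Int)) (bl ar : List Int)
    (h1 : bl.length = m.length) (h2 : ar.length = m.length) :
    ((m.zip (bl.zip ar)).map (fun p => p.2.1 :: p.1.tail.dropLast ++ [p.2.2])).map
      (fun rw => rw.getLastD 0) = ar := by
  induction m generalizing bl ar with
  | nil => cases ar <;> simp_all
  | cons x xs ih =>
    cases bl with | nil => simp at h1 | cons b bs =>
    cases ar with | nil => simp at h2 | cons a as =>
    have hx : (b :: (x.tail.dropLast ++ [a])).getLastD 0 = a := by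
      rw [show b :: (x.tail.dropLast ++ [a]) = (b :: x.tail.dropLast) ++ [a] by simp,
        List.getLastD_eq_getLast?, List.getLast?_concat]
      rfl
    simp_all

theorem getLast?_cons_ne {α : Type} (a : α) (l : List α) (h : l ≠ []) :
    (a :: l).getLast? = l.getLast? := by
  rcases l with _ | ⟨u, us⟩
  · exact absurd rfl h
  · exact List.getLast?_cons_cons ..

theorem stepA_rotate (cmd : String) (hcmd : ¬ cmd = "ShiftRow")
    (mm : List (List Int)) (tm bm : List Int) (mh ml : List Int) (th bh tl bl' : Int) :
    pvStepA (mm.length + 2) (tm :: mm ++ [bm], th :: mh ++ [bh], tl :: ml ++ [bl']) cmd =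
      ((th :: tm).dropLast :: mm ++ [(bm ++ [bl']).tail],
       mh ++ [bh, (bm ++ [bl']).headD 0],
       (th :: tm).getLastD 0 :: tl :: ml) := by
  have h1 : (tl :: (ml ++ [bl'])).getLast? = some bl' := by
    rw [show tl :: (ml ++ [bl']) = (tl :: ml) ++ [bl'] by simp, List.getLast?_concat]
  have h2 : (tl :: (ml ++ [bl'])).dropLast = tl :: ml := by
    rw [show tl :: (ml ++ [bl']) = (tl :: ml) ++ [bl'] by simp, List.dropLast_concat]
  simp [pvStepA, hcmd, h1, h2, modify_append_length, getD_append_length,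
    List.append_assoc]

theorem rotateB_concat (t0 b0 : Int) (tt bt : List Int) (m : List (List Int))
    (htt : tt ≠ []) (hbt : bt ≠ []) :
    pvRotateB ((t0 :: tt) :: (m ++ [b0 :: bt])) =
      ((m.map (fun rw => rw.headD 0) ++ [b0]).headD 0 :: t0 :: tt.dropLast) ::
      ((m.zip (((m.map (fun rw => rw.headD 0) ++ [b0]).tail).zip
          ((tt.getLastD 0 :: m.map (fun rw => rw.getLastD 0)).dropLast))).map
        (fun p => p.2.1 :: p.1.tail.dropLast ++ [p.2.2])) ++
      [bt ++ [(tt.getLastD 0 :: m.map (fun rw => rw.getLastD 0)).getLastD 0]] := by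
  have hne : ¬ ((t0 :: tt) :: (m ++ [b0 :: bt])).length = 1 := by simp
  have hlast : ((t0 :: tt) :: (m ++ [b0 :: bt])).getLast? = some (b0 :: bt) := by
    rw [show (t0 :: tt) :: (m ++ [b0 :: bt]) = ((t0 :: tt) :: m) ++ [b0 :: bt] by simp,
      List.getLast?_concat]
  have htgl : (t0 :: tt).getLastD 0 = tt.getLastD 0 := getLastD_cons_ne _ _ _ htt
  have htdl : (t0 :: tt).dropLast = t0 :: tt.dropLast := dropLast_cons_ne _ _ htt
  have htopv : PySem.List.pyGetD ((t0 :: tt) :: (m ++ [b0 :: bt])) 0 [] = t0 :: tt := by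
    rw [pyGetD0]; rfl
  have hbotv : PySem.List.pyGetD ((t0 :: tt) :: (m ++ [b0 :: bt])) (-1) [] = b0 :: bt := by
    simp [pyGetDneg1, List.getLastD_eq_getLast?, hlast]
  have hmidv : PySem.List.slice ((t0 :: tt) :: (m ++ [b0 :: bt])) (some 1) (some (-1)) = m := by
    rw [slice11]; simp [List.dropLast_concat]
  simp only [pvRotateB, if_neg hne, htopv, hbotv, hmidv, pyGetD0, pyGetDneg1, slice11,
    PySem.List.slice_from_one, PySem.List.slice_to_neg_one, htgl, htdl, List.tail_cons,
    List.headD_cons]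

theorem pvRotate_comm (g : List (List Int)) (c : Nat) (hc : 2 ≤ c)
    (hrows : ∀ rw ∈ g, rw.length = c) (hg : g ≠ [])
    (hcase : 2 ≤ g.length ∨ c = 2) (cmd : String) (hcmd : ¬ cmd = "ShiftRow") :
    pvStepA g.length (pvMids g, pvHeads g, pvLasts g) cmd =
      (pvMids (pvRotateB g), pvHeads (pvRotateB g), pvLasts (pvRotateB g)) := by
  rcases g with _ | ⟨t, rest⟩
  · exact absurd rfl hg
  rcases rest.eq_nil_or_concat with rfl | ⟨m, b, rfl⟩
  · have hc2 : c = 2 := by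
      rcases hcase with h | h
      · simp at h
      · exact h
    have htl : t.length = 2 := by have := hrows t (by simp); omega
    rcases t with _ | ⟨a0, t'⟩
    · simp at htl
    rcases t' with _ | ⟨a1, t''⟩
    · simp at htl
    rcases t'' with _ | ⟨a2, t'''⟩
    swap
    · simp at htl
    simp [pvStepA, pvRotateB, pvMids, pvHeads, pvLasts, hcmd, pyGetD0,
      PySem.List.slice_from_neg_one, PySem.List.slice_to_neg_one]
  · simp only [List.concat_eq_append] at hrows hcase ⊢
    have htl : t.length = c := hrows t (by simp)
    have hbl : b.length = c := hrows b (by simp)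
    rcases t with _ | ⟨t0, tt⟩
    · simp at htl; omega
    rcases b with _ | ⟨b0, bt⟩
    · simp at hbl; omega
    have htt : tt ≠ [] := by
      intro h; rw [h] at htl; simp at htl; omega
    have hbt : bt ≠ [] := by
      intro h; rw [h] at hbl; simp at hbl; omega
    have e1 : pvMids ((t0 :: tt) :: (m ++ [b0 :: bt])) =
        tt.dropLast :: m.map (fun rw => rw.tail.dropLast) ++ [bt.dropLast] := by simp [pvMids]
    have e2 : pvHeads ((t0 :: tt) :: (m ++ [b0 :: bt])) =
        t0 :: m.map (fun rw => rw.headD 0) ++ [b0] := by simp [pvHeads]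
    have e3 : pvLasts ((t0 :: tt) :: (m ++ [b0 :: bt])) =
        tt.getLastD 0 :: m.map (fun rw => rw.getLastD 0) ++ [bt.getLastD 0] := by
      simp [pvLasts, getLast?_cons_ne _ _ htt, getLast?_cons_ne _ _ hbt]
    have hlen : ((t0 :: tt) :: (m ++ [b0 :: bt])).length
        = (m.map (fun rw : List Int => rw.tail.dropLast)).length + 2 := by simp
    rw [e1, e2, e3, hlen, stepA_rotate cmd hcmd, rotateB_concat t0 b0 tt bt m htt hbt]
    have hb' : bt.dropLast ++ [bt.getLastD 0] = bt := dropLast_append_getLastD _ _ hbt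
    have h1len : ((m.map (fun rw : List Int => rw.headD 0) ++ [b0]).tail).length = m.length := by
      simp
    have h2len : ((tt.getLastD 0 :: m.map (fun rw : List Int => rw.getLastD 0)).dropLast).length
        = m.length := by simp
    have har : (tt.getLastD 0 :: m.map (fun rw : List Int => rw.getLastD 0)).dropLast ++
        [(tt.getLastD 0 :: m.map (fun rw : List Int => rw.getLastD 0)).getLastD 0]
        = tt.getLastD 0 :: m.map (fun rw : List Int => rw.getLastD 0) :=
      dropLast_append_getLastD _ _ (by simp)
    have hblne : (m.map (fun rw : List Int => rw.headD 0) ++ [b0]) ≠ [] := by simp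
    simp only [Prod.mk.injEq]
    refine ⟨?_, ?_, ?_⟩
    · -- mids
      rw [hb']
      simp only [pvMids, List.map_cons, List.map_append, List.tail_cons,
        zip3_mids _ _ _ h1len h2len, List.map_nil]
      rw [tail_append_left bt _ hbt]
      simp [List.dropLast_concat]
    · -- heads
      rw [hb']
      simp only [pvHeads, List.map_cons, List.map_append, List.headD_cons,
        zip3_heads _ _ _ h1len h2len, List.map_nil]
      rw [headD_append_left bt _ 0 hbt, headD_cons_tail _ 0 hblne]
      simp
    · -- lasts
      simp only [pvLasts, List.map_cons, List.map_append, zip3_lasts _ _ _ h1len h2len,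
        List.map_nil]
      rw [getLastD_cons_ne _ _ _ (by simp : (t0 :: tt.dropLast) ≠ [])]
      rw [show bt ++ [(tt.getLastD 0 :: m.map (fun rw : List Int => rw.getLastD 0)).getLastD 0]
          = bt ++ [(tt.getLastD 0 :: m.map (fun rw : List Int => rw.getLastD 0)).getLastD 0]
          from rfl]
      simp [List.getLastD_concat]
      simp only [← List.getLastD_eq_getLast?]
      exact har.symm


theorem pvRotOne_facts {α : Type} (l : List α) (h : l ≠ []) :
    (pvRotOne l).length = l.length ∧ pvRotOne l ≠ [] ∧ ∀ x ∈ pvRotOne l, x ∈ l := by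
  rcases l.eq_nil_or_concat with rfl | ⟨l', a, rfl⟩
  · exact absurd rfl h
  · refine ⟨by simp [pvRotOne], by simp [pvRotOne], ?_⟩
    intro x hx
    simp [pvRotOne] at hx
    rcases hx with rfl | hx
    · simp
    · simp [hx]

theorem pvRotateB_rows (g : List (List Int)) (c : Nat) (hc : 2 ≤ c)
    (hrows : ∀ rw ∈ g, rw.length = c) (hg : g ≠ []) :
    (pvRotateB g).length = g.length ∧ pvRotateB g ≠ [] ∧ ∀ rw ∈ pvRotateB g, rw.length = c := by
  rcases g with _ | ⟨t, rest⟩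
  · exact absurd rfl hg
  rcases rest.eq_nil_or_concat with rfl | ⟨m, b, rfl⟩
  · have htl : t.length = c := hrows t (by simp)
    have ht : t ≠ [] := by intro h; rw [h] at htl; simp at htl; omega
    refine ⟨by simp [pvRotateB], by simp [pvRotateB], ?_⟩
    intro rw hrw
    simp [pvRotateB, pyGetD0, PySem.List.slice_from_neg_one, PySem.List.slice_to_neg_one] at hrw
    subst hrw
    simp
    omega
  · simp only [List.concat_eq_append] at hrows ⊢
    have htl : t.length = c := hrows t (by simp)
    have hbl : b.length = c := hrows b (by simp)
    have hml : ∀ rw ∈ m, rw.length = c := fun rw h => hrows rw (by simp [h])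
    rcases t with _ | ⟨t0, tt⟩
    · simp at htl; omega
    rcases b with _ | ⟨b0, bt⟩
    · simp at hbl; omega
    have htt : tt ≠ [] := by intro h; rw [h] at htl; simp at htl; omega
    have hbt : bt ≠ [] := by intro h; rw [h] at hbl; simp at hbl; omega
    rw [rotateB_concat t0 b0 tt bt m htt hbt]
    have hzlen : (m.zip (((m.map (fun rw => rw.headD 0) ++ [b0]).tail).zip
        ((tt.getLastD 0 :: m.map (fun rw => rw.getLastD 0)).dropLast))).length = m.length := by
      simp
    refine ⟨by simp [hzlen], by simp, ?_⟩
    intro rw hrw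
    simp only [List.mem_cons, List.mem_append, List.mem_singleton, List.mem_map] at hrw
    rcases hrw with (rfl | ⟨p, hp, rfl⟩) | (rfl | habs)
    · have : tt.length = c - 1 := by simp at htl; omega
      simp [this]
      omega
    · obtain ⟨h1, _⟩ := List.of_mem_zip hp
      have hp1 : p.1.length = c := hml _ h1
      have hp1ne : p.1 ≠ [] := by intro h; rw [h] at hp1; simp at hp1; omega
      simp [hp1]
      omega
    · have : bt.length = c - 1 := by simp at hbl; omega
      simp [this]
      omega
    · simp at habs

theorem pvInv (ops : List String) (g : List (List Int)) (c R : Nat) (hc : 2 ≤ c)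
    (hg : g ≠ []) (hrows : ∀ rw ∈ g, rw.length = c) (hR : R = g.length)
    (hops : ∀ op ∈ ops, op ≠ "ShiftRow" → 2 ≤ g.length ∨ c = 2) :
    ops.foldl (pvStepA R) (pvMids g, pvHeads g, pvLasts g) =
      (pvMids (ops.foldl pvStepB g), pvHeads (ops.foldl pvStepB g),
        pvLasts (ops.foldl pvStepB g))
      ∧ (ops.foldl pvStepB g).length = g.length ∧ (ops.foldl pvStepB g) ≠ []
      ∧ ∀ rw ∈ ops.foldl pvStepB g, rw.length = c := by
  induction ops generalizing g with
  | nil => exact ⟨rfl, rfl, hg, hrows⟩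
  | cons op ops ih =>
    by_cases hop : op = "ShiftRow"
    · subst hop
      have hstep : pvStepB g "ShiftRow" = pvRotOne g := pvStepB_shift g
      obtain ⟨hl, hne, hmem⟩ := pvRotOne_facts g hg
      have := ih (pvRotOne g) hne (fun rw h => hrows rw (hmem rw h)) (hR.trans hl.symm)
        (fun o ho hne2 => by
          rw [hl]
          exact hops o (by simp [ho]) hne2)
      rw [hl] at this
      simpa [hstep, pvStepA_shift] using this
    · have hcase : 2 ≤ g.length ∨ c = 2 := hops op (by simp) hop
      have hstep : pvStepB g op = pvRotateB g := by simp [pvStepB, hop]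
      obtain ⟨hl, hne, hrows'⟩ := pvRotateB_rows g c hc hrows hg
      have hcomm := pvRotate_comm g c hc hrows hg hcase op hop
      have := ih (pvRotateB g) hne hrows' (hR.trans hl.symm)
        (fun o ho hne2 => by
          rw [hl]
          exact hops o (by simp [ho]) hne2)
      rw [hl, hR] at this
      rw [List.foldl_cons, List.foldl_cons, hstep, hR, hcomm]
      exact this

theorem getD_pyLast (rw : List Int) (c : Nat) (h : rw.length = c) (hc : 1 ≤ c) :
    PySem.List.pyGetD rw ((c : Int) - 1) 0 = rw.getLastD 0 := by
  have h1 : ((c : Int) - 1) = ((c - 1 : Nat) : Int) := by omega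
  rw [h1, PySem.List.pyGetD_natCast]
  rcases rw.eq_nil_or_concat with rfl | ⟨l, a, rfl⟩
  · simp at h; omega
  · have hl : l.length = c - 1 := by simp at h; omega
    rw [List.getD_eq_getElem?_getD]
    simp [← hl, List.getElem?_append_right]

theorem pyRange_map_index {α β : Type} (xs : List α) (d : α) (f : α → β) :
    (PySem.List.pyRange 0 (xs.length : Int) 1).map
      (fun i => f (PySem.List.pyGetD xs i d)) = xs.map f := by
  rw [show (fun i => f (PySem.List.pyGetD xs i d))
      = f ∘ (fun i => PySem.List.pyGetD xs i d) from rfl]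
  rw [← List.map_map, PySem.List.map_pyGetD_pyRange_zero' xs d]

theorem row_recomb (rw : List Int) (c : Nat) (h : rw.length = c) (hc : 2 ≤ c) :
    rw.headD 0 :: rw.tail.dropLast ++ [rw.getLastD 0] = rw := by
  rcases rw with _ | ⟨a, tt⟩
  · simp at h; omega
  have htt : tt ≠ [] := by intro hh; rw [hh] at h; simp at h; omega
  have h1 : (a :: tt).getLastD 0 = tt.getLastD 0 := getLastD_cons_ne _ _ _ htt
  simp only [List.headD_cons, List.tail_cons, h1, List.cons_append]
  rw [dropLast_append_getLastD tt 0 htt]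

theorem pvMain (rc : List (List Int)) (operations : List String)
    (hne : rc ≠ []) (hh : (rc.headD []) ≠ [])
    (hrows : ∀ row ∈ rc, row.length = (rc.headD []).length)
    (hnd : ¬ ((rc.headD []).length = 1 ∨
      (rc.length = 1 ∧ 3 ≤ (rc.headD []).length ∧ ∃ op ∈ operations, op ≠ "ShiftRow"))) :
    solution rc operations = solution_alt rc operations := by
  have hc1' : (rc.headD []).length ≠ 1 := fun h => hnd (Or.inl h)
  have hc1 : 1 ≤ (rc.headD []).length := by
    cases hl : (rc.headD []).length
    · exact absurd (List.length_eq_zero_iff.mp hl) hh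
    · omega
  have hc2 : 2 ≤ (rc.headD []).length := by omega
  have hops : ∀ op ∈ operations, op ≠ "ShiftRow" →
      2 ≤ rc.length ∨ (rc.headD []).length = 2 := by
    intro op hop hopne
    by_cases hlen : 2 ≤ rc.length
    · exact Or.inl hlen
    · have hlen1 : rc.length = 1 := by
        have : rc.length ≠ 0 := fun h => hne (List.length_eq_zero_iff.mp h)
        omega
      rcases Nat.lt_or_ge (rc.headD []).length 3 with h3 | h3
      · right; omega
      · exact absurd (Or.inr ⟨hlen1, h3, op, hop, hopne⟩) hnd
  obtain ⟨hfold, hlen, hGne, hGrows⟩ :=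
    pvInv operations rc (rc.headD []).length rc.length hc2 hne hrows rfl hops
  have hrowinit : rc.map (fun rw => PySem.List.slice rw (some 1) (some (-1))) = pvMids rc := by
    simp [pvMids, slice11]
  have hoc0init : (PySem.List.pyRange 0 (rc.length : Int) 1).map
      (fun i => PySem.List.pyGetD (PySem.List.pyGetD rc i []) 0 0) = pvHeads rc := by
    rw [pyRange_map_index rc [] (fun rw => PySem.List.pyGetD rw 0 0)]
    simp [pvHeads, pyGetD0]
  have hoc1init : (PySem.List.pyRange 0 (rc.length : Int) 1).map
      (fun k => PySem.List.pyGetD (PySem.List.pyGetD rc k [])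
        (((PySem.List.pyGetD rc 0 []).length : Int) - 1) 0) = pvLasts rc := by
    rw [pyRange_map_index rc []
      (fun rw => PySem.List.pyGetD rw (((PySem.List.pyGetD rc 0 []).length : Int) - 1) 0)]
    apply List.map_congr_left
    intro rw hrw
    have hcc : (PySem.List.pyGetD rc 0 []).length = (rc.headD []).length := by rw [pyGetD0]
    rw [hcc, getD_pyLast rw _ (hrows rw hrw) hc1]
  have halt : solution_alt rc operations = operations.foldl pvStepB rc := by
    simp [solution_alt]
  rw [halt]
  dsimp only [solution]
  rw [hrowinit, hoc0init, hoc1init, hfold]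
  rw [PySem.List.foldl_append_singleton_eq_map]
  set G := operations.foldl pvStepB rc with hG
  have hlenpr : (PySem.List.pyRange 0 (G.length : Int) 1).length = G.length := by
    have := congrArg List.length (PySem.List.map_pyGetD_pyRange_zero' G ([] : List Int))
    simpa using this
  rw [show (rc.length : Int) = (G.length : Int) by rw [hlen]]
  simp only [List.nil_append]
  apply List.ext_getElem?
  intro i
  by_cases hi : i < G.length
  · rw [PySem.List.getElem?_map_pyRange_zero _ G.length i hi]
    have hmem : G[i] ∈ G := List.getElem_mem _
    have hle : G[i].length = (rc.headD []).length := hGrows _ hmem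
    have e1 : PySem.List.pyGetD (pvHeads G) (i : Int) 0 = G[i].headD 0 := by
      rw [PySem.List.pyGetD_natCast, List.getD_eq_getElem?_getD]
      simp [pvHeads, hi]
    have e2 : PySem.List.pyGetD (pvMids G) (i : Int) [] = G[i].tail.dropLast := by
      rw [PySem.List.pyGetD_natCast, List.getD_eq_getElem?_getD]
      simp [pvMids, hi]
    have e3 : PySem.List.pyGetD (pvLasts G) (i : Int) 0 = G[i].getLastD 0 := by
      rw [PySem.List.pyGetD_natCast, List.getD_eq_getElem?_getD]
      simp [pvLasts, hi]
    rw [e1, e2, e3, row_recomb G[i] _ hle hc2]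
    rw [List.getElem?_eq_getElem hi]
  · have h1 : ((PySem.List.pyRange 0 (G.length : Int) 1).map
        (fun k => PySem.List.pyGetD (pvHeads G) k 0 ::
          PySem.List.pyGetD (pvMids G) k [] ++ [PySem.List.pyGetD (pvLasts G) k 0]))[i]? = none := by
      apply List.getElem?_eq_none
      simp only [List.length_map, hlenpr]
      omega
    rw [h1]
    rw [List.getElem?_eq_none]
    omega

-- ===== VERDICT (by name: the statement is the Claim_ definition above) =====
theorem solution_spec : Claim_unchanged_solution := by
  intro rc operations _hdom hpre hnd
  obtain ⟨hne, hh, hrows⟩ := hpre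
  unfold D_solution at hnd
  exact pvMain rc operations hne hh hrows hnd

theorem solution_changed : Claim_changed_solution := by
  unfold Claim_changed_solution; decide
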